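-- pv_equiv track=rewrite | github.com/rakshakonanur/vascularize | src/assign_pressure_bcs.py | remove_existing_pres_blocks
-- ===== SOURCE A (Python) =====
-- from typing import Dict, List, Tuple
--
-- def remove_existing_pres_blocks(lines: List[str]) -> List[str]:
--     out = []
--     skipping = False
--     for ln in lines:
--         if ln.startswith("DATATABLE PRES_BC_"):
--             skipping = True
--             continue
--         if skipping:
--             if ln.strip() == "ENDDATATABLE":
--                 skipping = False
--             continue
--         out.append(ln)
--     return out
-- ===== SOURCE B (Python) =====
-- def remove_existing_pres_blocks(lines):
--     # Two staged passes instead of a per-line skipping state machine: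
--     # Pass 1 (backward): end_after[i] = index of the first line j >= i whose
--     # strip() == "ENDDATATABLE", or n if there is none.
--     n = len(lines)
--     end_after = [n] * (n + 1)
--     for i in range(n - 1, -1, -1):
--         end_after[i] = i if lines[i].strip() == "ENDDATATABLE" else end_after[i + 1]
--     # Pass 2 (forward): a PRES_BC start at s blanks indices s..end_after[s];
--     # keep a line iff its index is past the furthest blanked bound.
--     out = []
--     bound = -1
--     for i, ln in enumerate(lines):
--         if ln.startswith("DATATABLE PRES_BC_"):
--             bound = max(bound, end_after[i])
--         if i > bound:
--             out.append(ln)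
--     return out
-- ===== Notes on version B (the rewrite author's own statement) =====
-- stated objective: alternative
-- what changed: Replaces A's single-pass boolean skipping state machine with two staged passes: a backward pass precomputing for each index the first following ENDDATATABLE index, then a forward pass that keeps a line iff its index is past the furthest bound blanked by any PRES_BC start.
import Mathlib
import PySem

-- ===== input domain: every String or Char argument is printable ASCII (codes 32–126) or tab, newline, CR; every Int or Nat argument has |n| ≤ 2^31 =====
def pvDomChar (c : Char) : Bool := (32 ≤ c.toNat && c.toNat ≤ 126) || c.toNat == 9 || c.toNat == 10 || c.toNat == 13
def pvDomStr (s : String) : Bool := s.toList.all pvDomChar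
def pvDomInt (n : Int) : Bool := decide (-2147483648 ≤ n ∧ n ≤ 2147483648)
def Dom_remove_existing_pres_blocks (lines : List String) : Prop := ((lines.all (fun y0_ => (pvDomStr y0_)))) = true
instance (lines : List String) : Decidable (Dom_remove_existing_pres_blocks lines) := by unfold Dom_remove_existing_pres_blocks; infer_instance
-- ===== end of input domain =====

-- B replaces A's one-pass skipping flag with two staged passes (a backward
-- next-ENDDATATABLE table, then a forward bound-threshold filter); same cost.

-- ===== PORT A =====
-- the for-loop of A over state (out, skipping)
def pvLoopA : List String → List String → Bool → List String
  | [], out, _ => out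
  | ln :: ls, out, skipping =>
    if PySem.Str.startswith ln "DATATABLE PRES_BC_" then
      pvLoopA ls out true
    else if skipping then
      if PySem.Str.strip ln == "ENDDATATABLE" then pvLoopA ls out false
      else pvLoopA ls out skipping
    else
      pvLoopA ls (out ++ [ln]) skipping

def remove_existing_pres_blocks (lines : List String) : List String :=
  pvLoopA lines [] false

-- ===== PORT B =====
-- B's backward pass: pvEndAfter n ls i is the list [end_after[i], …, end_after[n]]
-- for the suffix ls of the input starting at index i (end_after[n] = n); this is
-- the right-to-left array-filling loop of Source B written as structural recursion.
def pvEndAfter (n : Nat) : List String → Nat → List Nat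
  | [], _ => [n]
  | ln :: ls, i =>
    let rest := pvEndAfter n ls (i + 1)
    (if PySem.Str.strip ln == "ENDDATATABLE" then i else rest.headD n) :: rest

-- B's forward pass: enumerate with the furthest blanked bound; the port reads
-- end_after[i] as the head of the suffix of the table (exact: eas is nonempty
-- whenever ls is, lengths travel together).
def pvEmit : List String → List Nat → Nat → Int → List String
  | [], _, _, _ => []
  | ln :: ls, eas, i, bound =>
    let bound' := if PySem.Str.startswith ln "DATATABLE PRES_BC_" then
        max bound ((eas.headD 0 : Nat) : Int) else bound
    let rest := pvEmit ls eas.tail (i + 1) bound'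
    if (i : Int) > bound' then ln :: rest else rest

def remove_existing_pres_blocks_alt (lines : List String) : List String :=
  pvEmit lines (pvEndAfter lines.length lines 0) 0 (-1)

-- ===== PRECONDITION & SPEC =====
def Spec_remove_existing_pres_blocks (lines : List String) (out : List String) : Prop := out = remove_existing_pres_blocks_alt lines
instance (lines : List String) (out : List String) : Decidable (Spec_remove_existing_pres_blocks lines out) := by unfold Spec_remove_existing_pres_blocks; infer_instance

-- ===== CLAIM (what is proved, stated in full; the proofs are below) =====
def Claim_equal_remove_existing_pres_blocks : Prop := ∀ (lines : List String), Dom_remove_existing_pres_blocks lines → Spec_remove_existing_pres_blocks lines (remove_existing_pres_blocks lines)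

-- ===== LEMMAS AND PROOFS =====

-- a line starting with "DATATABLE PRES_BC_" can never strip to "ENDDATATABLE"
theorem pvStrip_ne_end (s : String)
    (h : PySem.Str.startswith s "DATATABLE PRES_BC_" = true) :
    (PySem.Str.strip s == "ENDDATATABLE") = false := by
  rw [beq_eq_false_iff_ne]
  intro hEq
  have hl : PySem.Chars.strip s.toList = "ENDDATATABLE".toList := by
    rw [← PySem.Str.toList_strip, hEq]
  have hp : "DATATABLE PRES_BC_".toList <+: s.toList := by
    rw [← PySem.Chars.startswith_iff]
    simpa using h
  obtain ⟨u, hu⟩ := hp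
  rw [← hu] at hl
  have hD : "DATATABLE PRES_BC_".toList ++ u = 'D' :: ("ATATABLE PRES_BC_".toList ++ u) := by
    rfl
  rw [hD] at hl
  have hls : PySem.Chars.lstrip ('D' :: ("ATATABLE PRES_BC_".toList ++ u))
      = 'D' :: ("ATATABLE PRES_BC_".toList ++ u) := by
    have hD : PySem.Chars.isspace 'D' = false := by decide
    simp [PySem.Chars.lstrip, hD]
  rw [PySem.Chars.strip, hls] at hl
  have hpre : PySem.Chars.rstrip ('D' :: ("ATATABLE PRES_BC_".toList ++ u))
      <+: 'D' :: ("ATATABLE PRES_BC_".toList ++ u) := by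
    unfold PySem.Chars.rstrip
    rw [← List.reverse_suffix]
    simpa using List.dropWhile_suffix (l := ('D' :: ("ATATABLE PRES_BC_".toList ++ u)).reverse)
      (p := PySem.Chars.isspace)
  rw [hl] at hpre
  obtain ⟨v, hv⟩ := hpre
  have : 'E' = 'D' := by
    have hv' : 'E' :: ("NDDATATABLE".toList ++ v) = 'D' :: ("ATATABLE PRES_BC_".toList ++ u) := by
      simpa using hv
    exact (List.cons.injEq _ _ _ _ ▸ hv').1
  simp at this

-- the head of the end_after suffix at index j is at least j (when j + len = n)
theorem pvEndAfter_head_ge (n : Nat) : ∀ (ls : List String) (j : Nat), j + ls.length = n →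
    j ≤ (pvEndAfter n ls j).headD n := by
  intro ls
  induction ls with
  | nil => intro j h; simp [pvEndAfter]; omega
  | cons ln ls ih =>
    intro j h
    simp only [pvEndAfter, List.headD_cons]
    split
    · exact Nat.le_refl _
    · have := ih (j + 1) (by simpa [Nat.add_comm, Nat.add_left_comm, Nat.add_assoc] using h)
      omega

-- main invariant: A's loop from index i with flag sk equals B's emit from index i,
-- provided sk ↔ the bound still covers i (sk true: bound is the first end ≥ i;
-- sk false: bound < i)
theorem pvMain (n : Nat) : ∀ (ls : List String) (i : Nat), i + ls.length = n →
    ∀ (sk : Bool) (bound : Int) (out : List String),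
    (sk = true → bound = ((pvEndAfter n ls i).headD n : Int)) →
    (sk = false → bound < (i : Int)) →
    pvLoopA ls out sk = out ++ pvEmit ls (pvEndAfter n ls i) i bound := by
  intro ls
  induction ls with
  | nil =>
    intro i h sk bound out _ _
    simp [pvLoopA, pvEmit, pvEndAfter]
  | cons ln ls ih =>
    intro i h sk bound out hT hF
    have hlen : (i + 1) + ls.length = n := by
      simpa [Nat.add_comm, Nat.add_left_comm, Nat.add_assoc] using h
    have hge' : (i + 1 : Nat) ≤ (pvEndAfter n ls (i + 1)).headD n :=
      pvEndAfter_head_ge n ls (i + 1) hlen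
    by_cases hsw : PySem.Str.startswith ln "DATATABLE PRES_BC_" = true
    · -- start line: A sets skipping; B raises the bound to e' ≥ i+1, drops the line
      have hne := pvStrip_ne_end ln hsw
      have hbound : bound < ((pvEndAfter n ls (i + 1)).headD n : Int) + 1 := by
        cases sk with
        | false => have := hF rfl; omega
        | true =>
          have := hT rfl
          simp only [pvEndAfter, List.headD_cons, hne, if_false, Bool.false_eq_true] at this
          omega
      have hmax : max bound (((pvEndAfter n ls (i + 1)).headD n : Nat) : Int)
          = ((pvEndAfter n ls (i + 1)).headD n : Int) := by omega
      simp only [pvLoopA, pvEmit, pvEndAfter, hsw, hne, if_true, if_false,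
        Bool.false_eq_true, List.headD_cons, List.tail_cons, hmax]
      have hdrop : ¬ ((i : Int) > ((pvEndAfter n ls (i + 1)).headD n : Int)) := by
        have : (i : Int) + 1 ≤ ((pvEndAfter n ls (i + 1)).headD n : Int) := by
          exact_mod_cast hge'
        omega
      rw [if_neg hdrop]
      exact ih (i + 1) hlen true _ out (fun _ => rfl) (by simp)
    · cases sk with
      | true =>
        have hb := hT rfl
        by_cases hend : (PySem.Str.strip ln == "ENDDATATABLE") = true
        · -- end line while skipping: dropped, flag cleared; B: bound = i, keeps nothing
          simp only [pvEndAfter, List.headD_cons, hend, if_true] at hb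
          simp only [pvLoopA, pvEmit, pvEndAfter, hsw, hend, if_true, if_false,
            Bool.false_eq_true, List.headD_cons, List.tail_cons]
          rw [if_neg (by omega : ¬ ((i : Int) > bound))]
          exact ih (i + 1) hlen false bound out (by simp) (fun _ => by omega)
        · -- interior line while skipping: dropped; bound = first end ≥ i+1 > i
          simp only [pvEndAfter, List.headD_cons, hend, if_false, Bool.false_eq_true] at hb
          have : (i : Int) + 1 ≤ bound := by rw [hb]; exact_mod_cast hge'
          simp only [pvLoopA, pvEmit, pvEndAfter, hsw, hend, if_true, if_false,
            Bool.false_eq_true, List.headD_cons, List.tail_cons]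
          rw [if_neg (by omega : ¬ ((i : Int) > bound))]
          exact ih (i + 1) hlen true bound out (fun _ => hb) (by simp)
      | false =>
        -- ordinary line: both keep it
        have hb := hF rfl
        simp only [pvLoopA, pvEmit, pvEndAfter, hsw, if_false, Bool.false_eq_true,
          List.headD_cons, List.tail_cons]
        rw [if_pos (by omega : (i : Int) > bound)]
        rw [ih (i + 1) hlen false bound (out ++ [ln]) (by simp) (fun _ => by omega)]
        simp

-- ===== VERDICT (by name: the statement is the Claim_ definition above) =====
theorem remove_existing_pres_blocks_spec : Claim_equal_remove_existing_pres_blocks := by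
  intro lines _
  unfold Spec_remove_existing_pres_blocks remove_existing_pres_blocks remove_existing_pres_blocks_alt
  simpa using pvMain lines.length lines 0 (by simp) false (-1) [] (by simp) (fun _ => by simp)
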